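-- pv_equiv track=rewrite | github.com/afham-b/ufo_shutter | analyze_shutter_flux.py | find_segments
-- ===== SOURCE A (Python) =====
-- def find_segments(mask, min_len=3):
--     segs = []
--     start = None
--     for i, v in enumerate(mask):
--         if v and start is None:
--             start = i
--         if (not v) and start is not None:
--             end = i - 1
--             if end - start + 1 >= min_len:
--                 segs.append((start, end))
--             start = None
--     if start is not None:
--         end = len(mask) - 1
--         if end - start + 1 >= min_len:
--             segs.append((start, end))
--     return segs
-- ===== SOURCE B (Python) =====
-- from itertools import groupby
--
-- def find_segments(mask, min_len=3):
--     segs = []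
--     idx = 0
--     for truthy, group in groupby(mask, key=bool):
--         length = sum(1 for _ in group)
--         if truthy and length >= min_len:
--             segs.append((idx, idx + length - 1))
--         idx += length
--     return segs
-- ===== Notes on version B (the rewrite author's own statement) =====
-- stated objective: idiomatic
-- what changed: Replaces the stateful start/None sentinel scan (with an after-loop flush) by an itertools.groupby grouping of consecutive equal-truthiness runs followed by a filter on truthy runs of sufficient length.
import Mathlib
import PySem

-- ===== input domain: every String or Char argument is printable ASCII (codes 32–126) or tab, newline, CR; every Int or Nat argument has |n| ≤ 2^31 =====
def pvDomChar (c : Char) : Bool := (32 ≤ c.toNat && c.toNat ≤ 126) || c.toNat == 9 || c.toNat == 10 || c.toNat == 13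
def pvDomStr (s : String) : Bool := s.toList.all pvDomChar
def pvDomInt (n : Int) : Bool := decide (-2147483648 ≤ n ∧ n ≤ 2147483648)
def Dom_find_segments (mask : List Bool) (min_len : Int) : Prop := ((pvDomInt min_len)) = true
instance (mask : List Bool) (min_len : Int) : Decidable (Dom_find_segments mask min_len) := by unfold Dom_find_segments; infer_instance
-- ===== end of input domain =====

-- B replaces A's stateful start/None sentinel scan by a group-consecutive-runs-then-filter formulation (idiomatic; return value equivalence).

-- ===== PORT A =====
-- one iteration of A's for-loop body (state = (segs, start))
def fsStep (min_len : Int) (st : List (Int × Int) × Option Int) (iv : Int × Bool)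
    : List (Int × Int) × Option Int :=
  let segs := st.1
  let start := st.2
  let i := iv.1
  let v := iv.2
  let start := if v && start.isNone then some i else start
  if (!v) && start.isSome then
    let e := i - 1
    (if e - start.get! + 1 ≥ min_len then segs ++ [(start.get!, e)] else segs, none)
  else
    (segs, start)

def find_segments (mask : List Bool) (min_len : Int) : List (Int × Int) :=
  let st := (PySem.List.enumerate mask).foldl (fsStep min_len) ([], none)
  match st.2 with
  | some s =>
    let e := (mask.length : Int) - 1
    if e - s + 1 ≥ min_len then st.1 ++ [(s, e)] else st.1
  | none => st.1

-- ===== PORT B =====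
-- groupby loop: each step strips one maximal run of equal values, accumulating the index
def fsGo (min_len : Int) : List Bool → Int → List (Int × Int)
  | [], _ => []
  | v :: t, idx =>
    let length : Int := 1 + (t.takeWhile (· == v)).length
    let rest := t.dropWhile (· == v)
    let tail := fsGo min_len rest (idx + length)
    if v && length ≥ min_len then (idx, idx + length - 1) :: tail else tail
termination_by l => l.length
decreasing_by
  simp only [List.length_cons]
  exact Nat.lt_succ_of_le (List.length_dropWhile_le _ _)

def find_segments_alt (mask : List Bool) (min_len : Int) : List (Int × Int) :=
  fsGo min_len mask 0

-- ===== PRECONDITION & SPEC =====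
def Spec_find_segments (mask : List Bool) (min_len : Int) (out : List (Int × Int)) : Prop := out = find_segments_alt mask min_len
instance (mask : List Bool) (min_len : Int) (out : List (Int × Int)) : Decidable (Spec_find_segments mask min_len out) := by unfold Spec_find_segments; infer_instance

-- ===== CLAIM (what is proved, stated in full; the proofs are below) =====
def Claim_equal_find_segments : Prop := ∀ (mask : List Bool) (min_len : Int), Dom_find_segments mask min_len → Spec_find_segments mask min_len (find_segments mask min_len)

-- ===== LEMMAS AND PROOFS =====

-- A's after-loop flush, as a function of the final state and the last index
def fsFinish (min_len : Int) (st : List (Int × Int) × Option Int) (e : Int) : List (Int × Int) :=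
  match st.2 with
  | some s => if e - s + 1 ≥ min_len then st.1 ++ [(s, e)] else st.1
  | none => st.1

theorem fsGo_false (m i : Int) (t : List Bool) : fsGo m (false :: t) i = fsGo m t (i + 1) := by
  cases t with
  | nil => simp [fsGo]
  | cons b t' =>
    cases b
    · simp only [fsGo, List.takeWhile, List.dropWhile]
      norm_num
      congr 1
      ring
    · simp [fsGo]

-- main invariant: running A's loop from index i with given state, then flushing,
-- equals the already-emitted segs plus B's runs (with the pending open run folded in when start = some s)
theorem fsLoop_eq (min_len : Int) : ∀ (l : List Bool) (i : Int) (segs : List (Int × Int)) (start : Option Int),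
    (start = none →
      fsFinish min_len ((PySem.List.enumerate l i).foldl (fsStep min_len) (segs, none)) (i + l.length - 1)
        = segs ++ fsGo min_len l i) ∧
    (∀ s, start = some s →
      fsFinish min_len ((PySem.List.enumerate l i).foldl (fsStep min_len) (segs, some s)) (i + l.length - 1)
        = (if i + ((l.takeWhile (· == true)).length : Int) - s ≥ min_len
            then segs ++ [(s, i + ((l.takeWhile (· == true)).length : Int) - 1)] else segs)
          ++ fsGo min_len (l.dropWhile (· == true)) (i + ((l.takeWhile (· == true)).length : Int))) := by
  intro l
  induction l with
  | nil =>
    intro i segs start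
    constructor
    · intro _
      simp [PySem.List.enumerate, fsFinish, fsGo]
    · intro s _
      simp only [PySem.List.enumerate, List.foldl_nil, fsFinish, fsGo, List.takeWhile,
        List.dropWhile, List.length_nil, Nat.cast_zero, List.append_nil]
      have h : i + 0 - s = i - 1 - s + 1 := by ring
      have h2 : i + 0 - 1 = i - 1 := by ring
      rw [h, h2]
  | cons v t ih =>
    intro i segs start
    have hlen : i + ((v :: t).length : Int) - 1 = i + 1 + (t.length : Int) - 1 := by
      simp only [List.length_cons]; push_cast; ring
    constructor
    · intro _
      rw [PySem.List.enumerate_cons, List.foldl_cons, hlen]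
      cases v
      · have hstep : fsStep min_len (segs, none) (i, false) = (segs, none) := by
          simp [fsStep]
        rw [hstep, (ih (i + 1) segs none).1 rfl, fsGo_false]
      · have hstep : fsStep min_len (segs, none) (i, true) = (segs, some i) := by
          simp [fsStep]
        rw [hstep, (ih (i + 1) segs (some i)).2 i rfl]
        simp only [fsGo, Bool.true_and, ge_iff_le]
        ring_nf
        simp only [decide_eq_true_eq]
        split_ifs <;> simp
    · intro s hs
      rw [PySem.List.enumerate_cons, List.foldl_cons, hlen]
      cases v
      · have hstep : fsStep min_len (segs, some s) (i, false)
            = (if i - 1 - s + 1 ≥ min_len then segs ++ [(s, i - 1)] else segs, none) := by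
          simp [fsStep]
        rw [hstep, (ih (i + 1) _ none).1 rfl]
        simp only [List.takeWhile_cons, List.dropWhile_cons]
        norm_num
        rw [fsGo_false]
        ring_nf
      · have hstep : fsStep min_len (segs, some s) (i, true) = (segs, some s) := by
          simp [fsStep]
        rw [hstep, (ih (i + 1) segs (some s)).2 s rfl]
        simp only [List.takeWhile_cons, List.dropWhile_cons]
        norm_num
        ring_nf

theorem find_segments_spec : Claim_equal_find_segments := by
  intro mask min_len _
  unfold Spec_find_segments find_segments find_segments_alt
  have h := (fsLoop_eq min_len mask 0 [] none).1 rfl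
  simp only [zero_add] at h
  simpa [fsFinish] using h
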